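-- pv_equiv track=rewrite | github.com/pypi-data/pypi-mirror-284 | packages/BioTEMPy/BioTEMPy-2.1.2.tar.gz/BioTEMPy-2.1.2/TEMPy/protein/prot_rep_biopy.py | get_next_chain_id
-- ===== SOURCE A (Python) =====
-- ALPHABET = 'ABCDEFGHIJKLMNOPQRSTUVWXYZ1234567890abcdefghijklmnopqrstuvwxyz'
--
-- def get_next_chain_id(chain_id, chain_list=False):
--     """
--     Renames chains based on mmCIF convention i.e. A -> B, Z -> 0 or g -> h
--     See the ALPHABET list for standard sequence, however any string can be
--     used for chain labelling.
--
--     For structures with more than 62 chains, the labels are increased in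
--     length, i.e. z -> AA, zz -> AAA, AAA -> BBB
--
--     Input: chain_id -> old chain id
--     Output: new_chain_id
--     """
--
--     if not chain_list:
--         chain_list = ALPHABET
--
--     try:
--         index = int(chain_list.index(chain_id[0]) + 1) + \
--             ((len(chain_id) - 1) * len(chain_list))
--     except ValueError:
--         index = 0
--
--     try:
--         new_chain_label = chain_list[index]
--     except IndexError:
--         n = 1
--         while index >= len(chain_list):
--             n += 1
--             index = index - len(chain_list)
--
--         new_chain_label = chain_list[index] * n
--
--     return new_chain_label
-- ===== SOURCE B (Python) =====
-- ALPHABET = 'ABCDEFGHIJKLMNOPQRSTUVWXYZ1234567890abcdefghijklmnopqrstuvwxyz'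
--
--
-- def get_next_chain_id(chain_id, chain_list=False):
--     labels = chain_list or ALPHABET
--     p = labels.find(chain_id[0])
--     index = 0 if p < 0 else p + 1 + (len(chain_id) - 1) * len(labels)
--     q, r = divmod(index, len(labels))
--     return labels[r] * (q + 1)
-- ===== Notes on version B (the rewrite author's own statement) =====
-- stated objective: simpler
-- what changed: The try/except IndexError tail with its repeated-subtraction while loop is replaced by a single branch-free divmod: labels[index % n] * (index // n + 1); str.index+try/except ValueError becomes str.find with a sign test.
import Mathlib
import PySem

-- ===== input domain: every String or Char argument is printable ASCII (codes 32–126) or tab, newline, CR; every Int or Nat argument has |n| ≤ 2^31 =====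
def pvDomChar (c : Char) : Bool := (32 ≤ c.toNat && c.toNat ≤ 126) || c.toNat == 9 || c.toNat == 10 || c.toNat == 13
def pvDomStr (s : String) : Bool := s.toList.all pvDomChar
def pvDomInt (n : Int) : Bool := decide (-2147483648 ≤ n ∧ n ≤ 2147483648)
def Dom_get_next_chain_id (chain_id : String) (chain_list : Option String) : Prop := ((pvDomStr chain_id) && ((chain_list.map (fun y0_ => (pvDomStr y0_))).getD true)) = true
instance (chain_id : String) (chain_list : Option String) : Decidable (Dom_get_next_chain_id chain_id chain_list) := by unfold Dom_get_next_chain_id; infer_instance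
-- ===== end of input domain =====

-- B replaces A's try/except tail with its repeated-subtraction while-loop by a single
-- uniform divmod + string-repeat; same return value (return-value equivalence only).

def ALPHABET : String := "ABCDEFGHIJKLMNOPQRSTUVWXYZ1234567890abcdefghijklmnopqrstuvwxyz"

-- ===== PORT A =====
-- the 'while index >= len(chain_list): n += 1; index -= len(chain_list)' loop of A
def subLoopA (L : Int) (index : Int) (n : Nat) : Int × Nat :=
  if h : 0 < L ∧ L ≤ index then subLoopA L (index - L) (n + 1) else (index, n)
  termination_by index.toNat
  decreasing_by omega

def get_next_chain_id (chain_id : String) (chain_list : Option String) : String :=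
  -- 'if not chain_list: chain_list = ALPHABET' (False default → none; "" is falsy)
  let cl : String :=
    match chain_list with
    | none => ALPHABET
    | some s => if s = "" then ALPHABET else s
  match PySem.Str.pyGet? chain_id 0 with
  | none => ""  -- chain_id[0] raises IndexError (not caught); excluded by Pre_
  | some c0 =>
    let L : Int := PySem.Str.len cl
    -- str.index raises ValueError exactly when find = -1, else equals find (exact)
    let f : Int := PySem.Str.find cl (String.singleton c0)
    let index : Int := if f = -1 then 0 else (f + 1) + (PySem.Str.len chain_id - 1) * L
    match PySem.Str.pyGet? cl index with
    | some c => String.ofList [c]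
    | none =>
      let p := subLoopA L index 1
      match PySem.Str.pyGet? cl p.1 with
      | some c => String.ofList (List.replicate p.2 c)
      | none => ""  -- unreachable: the loop leaves index in range

-- ===== PORT B =====
def get_next_chain_id_alt (chain_id : String) (chain_list : Option String) : String :=
  -- labels = chain_list or ALPHABET
  let labels : String :=
    match chain_list with
    | none => ALPHABET
    | some s => if s = "" then ALPHABET else s
  match PySem.Str.pyGet? chain_id 0 with
  | none => ""  -- chain_id[0] raises IndexError; excluded by Pre_
  | some c0 =>
    let L : Int := PySem.Str.len labels
    let p : Int := PySem.Str.find labels (String.singleton c0)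
    let index : Int := if p < 0 then 0 else p + 1 + (PySem.Str.len chain_id - 1) * L
    let q : Int := PySem.Int.floordiv index L
    let r : Int := PySem.Int.mod index L
    match PySem.Str.pyGet? labels r with
    | some c => String.ofList (List.replicate (q + 1).toNat c)
    | none => ""  -- unreachable: 0 ≤ r < L

-- ===== PRECONDITION & SPEC =====
-- Pre_ excludes only chain_id = "", on which A raises IndexError (chain_id[0]).
def Pre_get_next_chain_id (chain_id : String) (chain_list : Option String) : Prop :=
  chain_id ≠ ""
instance (chain_id : String) (chain_list : Option String) : Decidable (Pre_get_next_chain_id chain_id chain_list) := by unfold Pre_get_next_chain_id; infer_instance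

def pvWitness_get_next_chain_id : String × Option String := ("z", none)

def Spec_get_next_chain_id (chain_id : String) (chain_list : Option String) (out : String) : Prop := out = get_next_chain_id_alt chain_id chain_list
instance (chain_id : String) (chain_list : Option String) (out : String) : Decidable (Spec_get_next_chain_id chain_id chain_list out) := by unfold Spec_get_next_chain_id; infer_instance

-- ===== CLAIM (what is proved, stated in full; the proofs are below) =====
def Claim_equal_get_next_chain_id : Prop := ∀ (chain_id : String) (chain_list : Option String), Dom_get_next_chain_id chain_id chain_list → Pre_get_next_chain_id chain_id chain_list → Spec_get_next_chain_id chain_id chain_list (get_next_chain_id chain_id chain_list)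

-- ===== LEMMAS AND PROOFS =====

lemma subLoopA_eq (L index : Int) (n : Nat) (hL : 0 < L) (h0 : 0 ≤ index) :
    subLoopA L index n = (PySem.Int.mod index L, n + (PySem.Int.floordiv index L).toNat) := by
  fun_induction subLoopA L index n with
  | case1 index n h ih =>
    rw [ih (by omega)]
    rw [PySem.Int.mod_eq_emod_of_pos hL, PySem.Int.mod_eq_emod_of_pos hL,
        PySem.Int.floordiv_eq_ediv_of_pos hL, PySem.Int.floordiv_eq_ediv_of_pos hL]
    have e2 : index % L = (index - L) % L := (Int.sub_emod_right index L).symm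
    have e1 : index / L = (index - L) / L + 1 := by
      have h' := Int.add_mul_ediv_right (index - L) 1 (by omega : L ≠ 0)
      have hx : index - L + 1 * L = index := by ring
      rw [hx] at h'
      omega
    have hnn2 : 0 ≤ (index - L) / L := Int.ediv_nonneg (by omega) (by omega)
    refine Prod.ext ?_ ?_ <;> simp only [e1, e2] <;> omega
  | case2 index n h =>
    have hlt : index < L := by omega
    rw [PySem.Int.mod_eq_emod_of_pos hL, PySem.Int.floordiv_eq_ediv_of_pos hL]
    rw [Int.emod_eq_of_lt h0 hlt, Int.ediv_eq_zero_of_lt h0 hlt]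
    simp

lemma tail_eq (cl : String) (hcl : 0 < cl.toList.length) (index : Int) (h0 : 0 ≤ index) :
    (match PySem.Str.pyGet? cl index with
     | some c => String.ofList [c]
     | none =>
       match PySem.Str.pyGet? cl (subLoopA (PySem.Str.len cl) index 1).1 with
       | some c => String.ofList (List.replicate (subLoopA (PySem.Str.len cl) index 1).2 c)
       | none => "") =
    (match PySem.Str.pyGet? cl (PySem.Int.mod index (PySem.Str.len cl)) with
     | some c => String.ofList (List.replicate (PySem.Int.floordiv index (PySem.Str.len cl) + 1).toNat c)
     | none => "") := by
  have hlen : PySem.Str.len cl = (cl.toList.length : Int) := by simp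
  have hL : 0 < (cl.toList.length : Int) := by exact_mod_cast hcl
  by_cases hlt : index < (cl.toList.length : Int)
  · have hmod : PySem.Int.mod index (PySem.Str.len cl) = index := by
      rw [hlen, PySem.Int.mod_eq_emod_of_pos hL]; exact Int.emod_eq_of_lt h0 hlt
    have hdiv : PySem.Int.floordiv index (PySem.Str.len cl) = 0 := by
      rw [hlen, PySem.Int.floordiv_eq_ediv_of_pos hL]; exact Int.ediv_eq_zero_of_lt h0 hlt
    have hin : PySem.Str.pyGet? cl index = some (cl.toList[index.toNat]'(by omega)) := by
      simp only [PySem.Str.pyGet?_eq, PySem.Chars.pyGet?_eq_listPyGet?]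
      exact PySem.List.pyGet?_eq_some_getElem cl.toList h0 hlt
    rw [hmod, hdiv, hin]
    simp
  · have hnone : PySem.Str.pyGet? cl index = none := by
      simp only [PySem.Str.pyGet?_eq, PySem.Chars.pyGet?_eq_listPyGet?]
      rw [PySem.List.pyGet?_eq_none_iff]
      unfold PySem.Raise.InRange
      omega
    have hq : 0 ≤ PySem.Int.floordiv index (cl.toList.length : Int) := by
      rw [PySem.Int.floordiv_eq_ediv_of_pos hL]; exact Int.ediv_nonneg h0 (by omega)
    have hr0 : 0 ≤ PySem.Int.mod index (cl.toList.length : Int) := PySem.Int.mod_nonneg _ hL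
    have hrL : PySem.Int.mod index (cl.toList.length : Int) < (cl.toList.length : Int) :=
      PySem.Int.mod_lt _ hL
    have hin : PySem.Str.pyGet? cl (PySem.Int.mod index (cl.toList.length : Int)) =
        some (cl.toList[(PySem.Int.mod index (cl.toList.length : Int)).toNat]'(by omega)) := by
      simp only [PySem.Str.pyGet?_eq, PySem.Chars.pyGet?_eq_listPyGet?]
      exact PySem.List.pyGet?_eq_some_getElem cl.toList hr0 hrL
    have hcount : (PySem.Int.floordiv index (cl.toList.length : Int) + 1).toNat
        = 1 + (PySem.Int.floordiv index (cl.toList.length : Int)).toNat := by omega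
    rw [hnone, hlen]
    rw [subLoopA_eq _ _ _ hL h0]
    simp only [hin, hcount]

-- the two port bodies agree for any fixed (nonempty) label string cl
lemma core_eq (chain_id cl : String) (hcl : 0 < cl.toList.length) :
    (match PySem.Str.pyGet? chain_id 0 with
     | none => ""
     | some c0 =>
       match PySem.Str.pyGet? cl
           (if PySem.Str.find cl (String.singleton c0) = -1 then 0
            else PySem.Str.find cl (String.singleton c0) + 1
              + (PySem.Str.len chain_id - 1) * PySem.Str.len cl) with
       | some c => String.ofList [c]
       | none =>
         match PySem.Str.pyGet? cl
             (subLoopA (PySem.Str.len cl)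
               (if PySem.Str.find cl (String.singleton c0) = -1 then 0
                else PySem.Str.find cl (String.singleton c0) + 1
                  + (PySem.Str.len chain_id - 1) * PySem.Str.len cl) 1).1 with
         | some c => String.ofList (List.replicate
             (subLoopA (PySem.Str.len cl)
               (if PySem.Str.find cl (String.singleton c0) = -1 then 0
                else PySem.Str.find cl (String.singleton c0) + 1
                  + (PySem.Str.len chain_id - 1) * PySem.Str.len cl) 1).2 c)
         | none => "") =
    (match PySem.Str.pyGet? chain_id 0 with
     | none => ""
     | some c0 =>
       match PySem.Str.pyGet? cl
           (PySem.Int.mod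
             (if PySem.Str.find cl (String.singleton c0) < 0 then 0
              else PySem.Str.find cl (String.singleton c0) + 1
                + (PySem.Str.len chain_id - 1) * PySem.Str.len cl)
             (PySem.Str.len cl)) with
       | some c => String.ofList (List.replicate
           (PySem.Int.floordiv
             (if PySem.Str.find cl (String.singleton c0) < 0 then 0
              else PySem.Str.find cl (String.singleton c0) + 1
                + (PySem.Str.len chain_id - 1) * PySem.Str.len cl)
             (PySem.Str.len cl) + 1).toNat c)
       | none => "") := by
  rcases hget : PySem.Str.pyGet? chain_id 0 with _ | c0
  · rfl
  · simp only []
    have hidlen : 0 < (chain_id.toList.length : Int) := by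
      by_contra hc
      have hnone : PySem.Str.pyGet? chain_id 0 = none := by
        simp only [PySem.Str.pyGet?_eq, PySem.Chars.pyGet?_eq_listPyGet?]
        rw [PySem.List.pyGet?_eq_none_iff]
        unfold PySem.Raise.InRange
        omega
      rw [hnone] at hget
      exact absurd hget (by simp)
    have hf : -1 ≤ PySem.Str.find cl (String.singleton c0) := by
      simpa using PySem.Chars.neg_one_le_find cl.toList (String.singleton c0).toList
    have hifeq : (if PySem.Str.find cl (String.singleton c0) < 0 then (0 : Int)
          else PySem.Str.find cl (String.singleton c0) + 1 + (PySem.Str.len chain_id - 1) * PySem.Str.len cl)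
        = (if PySem.Str.find cl (String.singleton c0) = -1 then (0 : Int)
          else PySem.Str.find cl (String.singleton c0) + 1 + (PySem.Str.len chain_id - 1) * PySem.Str.len cl) := by
      by_cases h : PySem.Str.find cl (String.singleton c0) = -1
      · rw [if_pos h, if_pos (by omega)]
      · rw [if_neg h, if_neg (by omega)]
    rw [hifeq]
    have h0 : 0 ≤ (if PySem.Str.find cl (String.singleton c0) = -1 then (0 : Int)
        else PySem.Str.find cl (String.singleton c0) + 1 + (PySem.Str.len chain_id - 1) * PySem.Str.len cl) := by
      by_cases h : PySem.Str.find cl (String.singleton c0) = -1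
      · rw [if_pos h]
      · rw [if_neg h]
        have hlen1 : PySem.Str.len chain_id = (chain_id.toList.length : Int) := by simp
        have hlen2 : PySem.Str.len cl = (cl.toList.length : Int) := by simp
        have hmul : 0 ≤ (PySem.Str.len chain_id - 1) * PySem.Str.len cl :=
          mul_nonneg (by omega) (by omega)
        omega
    exact tail_eq cl hcl _ h0

-- ===== VERDICT (by name: the statement is the Claim_ definition above) =====
theorem get_next_chain_id_spec : Claim_equal_get_next_chain_id := by
  intro chain_id chain_list _ _
  unfold Spec_get_next_chain_id
  simp only [get_next_chain_id, get_next_chain_id_alt]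
  have hcl : 0 < (match chain_list with
      | none => ALPHABET
      | some s => if s = "" then ALPHABET else s).toList.length := by
    rcases chain_list with _ | s
    · decide
    · by_cases hs : s = ""
      · simp only [if_pos hs]; decide
      · simp only [if_neg hs]
        rcases h : s.toList with _ | _
        · exact absurd (by simpa using congrArg String.ofList h) hs
        · simp
  revert hcl
  generalize (match chain_list with
      | none => ALPHABET
      | some s => if s = "" then ALPHABET else s) = cl
  intro hcl
  exact core_eq chain_id cl hcl
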